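-- pv_equiv track=rewrite | github.com/data-eng/Predict-Energy-Consumption-under-Realistic-Operational-Conditions | data_creation/nan_exploration.py | find_common_nan_ranges
-- ===== SOURCE A (Python) =====
-- def find_common_nan_ranges(nan_ranges):
--     common_ranges = []
--
--     # Convert the nan ranges to sets of indices
--     sets_of_nan_indices = []
--     for col, ranges in nan_ranges.items():
--         nan_indices = set()
--         for start, end in ranges:
--             nan_indices.update(range(start, end + 1))
--         sets_of_nan_indices.append(nan_indices)
--
--     # Find intersection of all sets of indices
--     common_nan_indices = set.intersection(*sets_of_nan_indices)
--
--     # Convert the set of common indices back to ranges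
--     if common_nan_indices:
--         sorted_indices = sorted(common_nan_indices)
--         start_idx = sorted_indices[0]
--         for i in range(1, len(sorted_indices)):
--             if sorted_indices[i] != sorted_indices[i - 1] + 1:
--                 common_ranges.append((start_idx, sorted_indices[i - 1]))
--                 start_idx = sorted_indices[i]
--         common_ranges.append((start_idx, sorted_indices[-1]))
--
--     return common_ranges
-- ===== SOURCE B (Python) =====
-- def _merge(ivs):
--     # ivs: non-empty-filtered intervals sorted by start; coalesce overlapping/adjacent ones
--     out = []
--     cur = None
--     for s, e in ivs:
--         if cur is None:
--             cur = (s, e)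
--         elif s <= cur[1] + 1:
--             if e > cur[1]:
--                 cur = (cur[0], e)
--         else:
--             out.append(cur)
--             cur = (s, e)
--     if cur is not None:
--         out.append(cur)
--     return out
--
--
-- def _intersect(xs, ys):
--     # two-pointer intersection of two disjoint sorted interval lists
--     out = []
--     i = j = 0
--     while i < len(xs) and j < len(ys):
--         s = max(xs[i][0], ys[j][0])
--         e = min(xs[i][1], ys[j][1])
--         if s <= e:
--             out.append((s, e))
--         if xs[i][1] <= ys[j][1]:
--             i += 1
--         else:
--             j += 1
--     return out
--
--
-- def find_common_nan_ranges(nan_ranges):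
--     cols = [
--         _merge(sorted(((s, e) for s, e in ranges if s <= e), key=lambda p: p[0]))
--         for ranges in nan_ranges.values()
--     ]
--     common = cols[0]
--     for merged in cols[1:]:
--         common = _intersect(common, merged)
--     return common
-- ===== Notes on version B (the rewrite author's own statement) =====
-- stated objective: alternative
-- what changed: Instead of materialising every integer index of every range into per-column sets, intersecting the sets and rebuilding runs from the sorted indices, B merges each column's intervals after sorting them by start and then intersects the columns' disjoint interval lists with a two-pointer sweep, never enumerating individual indices.
-- outside the precondition, e.g. on find_common_nan_ranges({}): A raises TypeError, B raises IndexError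
import Mathlib
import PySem

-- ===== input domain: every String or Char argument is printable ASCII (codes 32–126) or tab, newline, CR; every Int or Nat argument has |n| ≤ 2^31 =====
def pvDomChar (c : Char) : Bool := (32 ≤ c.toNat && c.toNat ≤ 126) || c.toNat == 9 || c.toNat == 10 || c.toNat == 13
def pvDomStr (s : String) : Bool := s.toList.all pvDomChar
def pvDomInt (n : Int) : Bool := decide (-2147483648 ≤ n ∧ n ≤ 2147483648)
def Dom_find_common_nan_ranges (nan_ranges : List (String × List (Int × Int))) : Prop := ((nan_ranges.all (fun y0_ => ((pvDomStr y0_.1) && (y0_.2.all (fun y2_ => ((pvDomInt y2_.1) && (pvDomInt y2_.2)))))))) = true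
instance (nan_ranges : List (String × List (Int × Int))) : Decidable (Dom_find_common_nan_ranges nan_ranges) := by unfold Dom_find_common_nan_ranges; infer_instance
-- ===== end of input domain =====

-- B replaces A's "materialise every index of every range into sets, intersect the sets,
-- sort, and rebuild runs" by per-column interval merging followed by a two-pointer
-- interval intersection across columns, never enumerating individual indices (objective: alternative).

-- ===== PORT A =====
def find_common_nan_ranges (nan_ranges : List (String × List (Int × Int))) : List (Int × Int) :=
  -- for col, ranges in nan_ranges.items(): build set of all indices of all ranges
  let sets_of_nan_indices : List (PySem.Set Int) :=
    nan_ranges.map (fun cr =>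
      cr.2.foldl (fun nan_indices p =>
        PySem.Set.update nan_indices (PySem.List.pyRange p.1 (p.2 + 1) 1)) PySem.Set.empty)
  match sets_of_nan_indices with
  | [] => []  -- Python raises TypeError here (set.intersection with no arguments); excluded by Pre_
  | s0 :: rest =>
    let common_nan_indices := rest.foldl PySem.Set.inter s0
    if common_nan_indices.isEmpty then []
    else
      let sorted_indices := PySem.List.sorted common_nan_indices (fun x => x) false
      let st := (PySem.List.pyRange 1 (sorted_indices.length : Int) 1).foldl
        (fun (st : List (Int × Int) × Int) i =>
          if PySem.List.pyGetD sorted_indices i 0 ≠ PySem.List.pyGetD sorted_indices (i - 1) 0 + 1 then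
            (st.1 ++ [(st.2, PySem.List.pyGetD sorted_indices (i - 1) 0)],
             PySem.List.pyGetD sorted_indices i 0)
          else st)
        ([], PySem.List.pyGetD sorted_indices 0 0)
      st.1 ++ [(st.2, PySem.List.pyGetD sorted_indices (-1) 0)]

-- ===== PORT B =====
-- _merge loop body: state = (out, cur); cur is the interval being grown
def pvMergeStep (st : List (Int × Int) × Option (Int × Int)) (p : Int × Int) :
    List (Int × Int) × Option (Int × Int) :=
  match st.2 with
  | none => (st.1, some p)
  | some cur =>
    if p.1 ≤ cur.2 + 1 then
      if p.2 > cur.2 then (st.1, some (cur.1, p.2)) else st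
    else (st.1 ++ [cur], some p)

def pvMerge (ivs : List (Int × Int)) : List (Int × Int) :=
  let st := ivs.foldl pvMergeStep ([], none)
  match st.2 with
  | none => st.1
  | some cur => st.1 ++ [cur]

-- _intersect: the two-pointer while loop, as recursion on the two remaining suffixes
def pvIntersect : List (Int × Int) → List (Int × Int) → List (Int × Int)
  | x :: xs, y :: ys =>
    let s := max x.1 y.1
    let e := min x.2 y.2
    let hd := if s ≤ e then [(s, e)] else []
    if x.2 ≤ y.2 then hd ++ pvIntersect xs (y :: ys)
    else hd ++ pvIntersect (x :: xs) ys
  | _, _ => []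
termination_by xs ys => xs.length + ys.length

def find_common_nan_ranges_alt (nan_ranges : List (String × List (Int × Int))) : List (Int × Int) :=
  let cols : List (List (Int × Int)) :=
    nan_ranges.map (fun cr =>
      pvMerge (PySem.List.sorted (cr.2.filter (fun p => p.1 ≤ p.2)) (fun p => p.1) false))
  match cols with
  | [] => []  -- Python raises IndexError here (cols[0] on an empty list); excluded by Pre_
  | c0 :: rest => rest.foldl pvIntersect c0

-- ===== PRECONDITION & SPEC =====
-- Pre_ excludes the empty dict, on which Python A raises TypeError (set.intersection with
-- no arguments) and Python B raises IndexError; the Nodup conjunct only says the association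
-- list really represents a Python dict (a dict cannot carry duplicate keys).
def Pre_find_common_nan_ranges (nan_ranges : List (String × List (Int × Int))) : Prop :=
  nan_ranges ≠ [] ∧ (nan_ranges.map Prod.fst).Nodup
instance (nan_ranges : List (String × List (Int × Int))) : Decidable (Pre_find_common_nan_ranges nan_ranges) := by unfold Pre_find_common_nan_ranges; infer_instance

def pvWitness_find_common_nan_ranges : (List (String × List (Int × Int))) :=
  [("a", [(1, 3), (7, 9)]), ("b", [(2, 8)])]

def Spec_find_common_nan_ranges (nan_ranges : List (String × List (Int × Int))) (out : List (Int × Int)) : Prop := out = find_common_nan_ranges_alt nan_ranges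
instance (nan_ranges : List (String × List (Int × Int))) (out : List (Int × Int)) : Decidable (Spec_find_common_nan_ranges nan_ranges out) := by unfold Spec_find_common_nan_ranges; infer_instance

-- ===== CLAIM (what is proved, stated in full; the proofs are below) =====
def Claim_equal_find_common_nan_ranges : Prop := ∀ (nan_ranges : List (String × List (Int × Int))), Dom_find_common_nan_ranges nan_ranges → Pre_find_common_nan_ranges nan_ranges → Spec_find_common_nan_ranges nan_ranges (find_common_nan_ranges nan_ranges)

-- ===== LEMMAS AND PROOFS =====

-- x is covered by some interval of l
def pvCov (l : List (Int × Int)) (x : Int) : Prop := ∃ p ∈ l, p.1 ≤ x ∧ x ≤ p.2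

-- a normalised interval list: valid intervals, sorted, with gaps ≥ 2 between neighbours
def pvNorm (l : List (Int × Int)) : Prop :=
  (∀ p ∈ l, p.1 ≤ p.2) ∧ l.Pairwise (fun p q => p.2 + 2 ≤ q.1)

theorem pvCov_cons (p : Int × Int) (l : List (Int × Int)) (x : Int) :
    pvCov (p :: l) x ↔ (p.1 ≤ x ∧ x ≤ p.2) ∨ pvCov l x := by simp [pvCov]

theorem pvCov_append (l m : List (Int × Int)) (x : Int) :
    pvCov (l ++ m) x ↔ pvCov l x ∨ pvCov m x := by
  simp [pvCov, or_and_right, exists_or]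

theorem pvCov_singleton (a b x : Int) : pvCov [(a, b)] x ↔ a ≤ x ∧ x ≤ b := by
  simp [pvCov]

-- a normalised list is determined by the set it covers
theorem pvNorm_unique (l m : List (Int × Int)) (hl : pvNorm l) (hm : pvNorm m)
    (h : ∀ x, pvCov l x ↔ pvCov m x) : l = m := by
  induction l generalizing m with
  | nil =>
    cases m with
    | nil => rfl
    | cons q u =>
      exfalso
      have : pvCov (q :: u) q.1 := ⟨q, by simp, le_refl _, hm.1 q (by simp)⟩
      exact (by simpa [pvCov] using (h q.1).mpr this)
  | cons p t ih =>
    cases m with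
    | nil =>
      exfalso
      have : pvCov (p :: t) p.1 := ⟨p, by simp, le_refl _, hl.1 p (by simp)⟩
      exact (by simpa [pvCov] using (h p.1).mp this)
    | cons q u =>
      have hpv : p.1 ≤ p.2 := hl.1 p (by simp)
      have hqv : q.1 ≤ q.2 := hm.1 q (by simp)
      have hlt : ∀ r ∈ t, p.2 + 2 ≤ r.1 := fun r hr => (List.pairwise_cons.mp hl.2).1 r hr
      have hmt : ∀ r ∈ u, q.2 + 2 ≤ r.1 := fun r hr => (List.pairwise_cons.mp hm.2).1 r hr
      -- lower bounds of starts
      have hlb : ∀ x, pvCov (p :: t) x → p.1 ≤ x := by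
        rintro x ⟨r, hr, h1, h2⟩
        rcases List.mem_cons.mp hr with rfl | hr
        · exact h1
        · have := hlt r hr; omega
      have hmb : ∀ x, pvCov (q :: u) x → q.1 ≤ x := by
        rintro x ⟨r, hr, h1, h2⟩
        rcases List.mem_cons.mp hr with rfl | hr
        · exact h1
        · have := hmt r hr; omega
      have h1 : p.1 = q.1 := by
        have ha := hmb p.1 ((h p.1).mp ⟨p, by simp, le_refl _, hpv⟩)
        have hb := hlb q.1 ((h q.1).mpr ⟨q, by simp, le_refl _, hqv⟩)
        omega
      have h2 : p.2 = q.2 := by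
        by_contra hne
        rcases lt_or_gt_of_ne hne with hlt2 | hgt2
        · -- p.2 < q.2 : p.2+1 covered by m not by l
          have hcm : pvCov (q :: u) (p.2 + 1) := ⟨q, by simp, by omega, by omega⟩
          rcases (h (p.2+1)).mpr hcm with ⟨r, hr, ha, hb⟩
          rcases List.mem_cons.mp hr with rfl | hr
          · omega
          · have := hlt r hr; omega
        · have hcm : pvCov (p :: t) (q.2 + 1) := ⟨p, by simp, by omega, by omega⟩
          rcases (h (q.2+1)).mp hcm with ⟨r, hr, ha, hb⟩
          rcases List.mem_cons.mp hr with rfl | hr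
          · omega
          · have := hmt r hr; omega
      have htail : ∀ x, pvCov t x ↔ pvCov u x := by
        intro x
        constructor
        · rintro ⟨r, hr, ha, hb⟩
          have hgt : p.2 + 2 ≤ x := le_trans (hlt r hr) ha
          rcases (h x).mp ⟨r, by simp [hr], ha, hb⟩ with ⟨r', hr', ha', hb'⟩
          rcases List.mem_cons.mp hr' with rfl | hr'
          · omega
          · exact ⟨r', hr', ha', hb'⟩
        · rintro ⟨r, hr, ha, hb⟩
          have hgt : q.2 + 2 ≤ x := le_trans (hmt r hr) ha
          rcases (h x).mpr ⟨r, by simp [hr], ha, hb⟩ with ⟨r', hr', ha', hb'⟩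
          rcases List.mem_cons.mp hr' with rfl | hr'
          · omega
          · exact ⟨r', hr', ha', hb'⟩
      have ht : t = u := ih u ⟨fun r hr => hl.1 r (List.mem_cons_of_mem _ hr), hl.2.of_cons⟩
        ⟨fun r hr => hm.1 r (List.mem_cons_of_mem _ hr), hm.2.of_cons⟩ htail
      have : p = q := Prod.ext h1 h2
      rw [this, ht]

-- ---------- A side ----------

-- run reconstruction, structurally
def pvGo (acc : List (Int × Int)) (st prev : Int) : List Int → List (Int × Int)
  | [] => acc ++ [(st, prev)]
  | c :: rest =>
    if c ≠ prev + 1 then pvGo (acc ++ [(st, prev)]) c c rest else pvGo acc st c rest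

theorem pvGo_cov (rest : List Int) (acc : List (Int × Int)) (st prev x : Int)
    (h : st ≤ prev) :
    pvCov (pvGo acc st prev rest) x ↔ pvCov acc x ∨ (st ≤ x ∧ x ≤ prev) ∨ x ∈ rest := by
  induction rest generalizing acc st prev with
  | nil => simp only [pvGo]; rw [pvCov_append, pvCov_singleton]; simp
  | cons c rest ih =>
    simp only [pvGo]
    split_ifs with hc
    · rw [ih _ _ _ (le_refl c), pvCov_append, pvCov_singleton]
      simp only [List.mem_cons]
      constructor
      · rintro ((h1 | h1) | h1 | h1)
        · tauto
        · tauto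
        · exact Or.inr (Or.inr (Or.inl (by omega)))
        · tauto
      · rintro (h1 | h1 | h1 | h1)
        · tauto
        · tauto
        · exact Or.inr (Or.inl (by omega))
        · tauto
    · have hc' : c = prev + 1 := by omega
      rw [ih _ _ _ (by omega)]
      subst hc'
      simp only [List.mem_cons]
      constructor
      · rintro (h1 | h1 | h1)
        · tauto
        · rcases Int.lt_or_le x (prev + 1) with hx | hx
          · exact Or.inr (Or.inl ⟨h1.1, by omega⟩)
          · exact Or.inr (Or.inr (Or.inl (by omega)))
        · tauto
      · rintro (h1 | h1 | h1)
        · tauto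
        · exact Or.inr (Or.inl ⟨h1.1, by omega⟩)
        · rcases h1 with rfl | h1
          · exact Or.inr (Or.inl ⟨by omega, by omega⟩)
          · tauto

theorem pvGo_norm (rest : List Int) (acc : List (Int × Int)) (st prev : Int)
    (hv : ∀ p ∈ acc, p.1 ≤ p.2) (hp : acc.Pairwise (fun p q => p.2 + 2 ≤ q.1))
    (hb : ∀ p ∈ acc, p.2 + 2 ≤ st) (hsp : st ≤ prev)
    (hc : List.IsChain (· < ·) (prev :: rest)) :
    pvNorm (pvGo acc st prev rest) := by
  induction rest generalizing acc st prev with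
  | nil =>
    simp only [pvGo]
    refine ⟨?_, ?_⟩
    · intro p hp'
      rcases List.mem_append.mp hp' with h1 | h1
      · exact hv p h1
      · simp at h1; subst h1; exact hsp
    · rw [List.pairwise_append]
      refine ⟨hp, List.pairwise_singleton _ _, ?_⟩
      intro p h1 q h2
      simp at h2; subst h2
      exact hb p h1
  | cons c rest ih =>
    have hpc : prev < c := by simpa using (List.isChain_cons_cons.mp hc).1
    have hc' : List.IsChain (· < ·) (c :: rest) := hc.of_cons
    simp only [pvGo]
    split_ifs with hcc
    · refine ih _ _ _ ?_ ?_ ?_ (le_refl c) hc'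
      · intro p h1
        rcases List.mem_append.mp h1 with h2 | h2
        · exact hv p h2
        · simp at h2; subst h2; exact hsp
      · rw [List.pairwise_append]
        refine ⟨hp, List.pairwise_singleton _ _, ?_⟩
        intro p h1 q h2
        simp at h2; subst h2
        exact hb p h1
      · intro p h1
        rcases List.mem_append.mp h1 with h2 | h2
        · have := hb p h2; omega
        · simp at h2; subst h2; simp; omega
    · exact ih _ _ _ hv hp (fun p h1 => hb p h1) (by omega) hc'

theorem pvGetD_neg_one (a : Int) (t : List Int) :
    PySem.List.pyGetD (a :: t) (-1) 0 = (a :: t).getLast (by simp) := by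
  simp [PySem.List.pyGetD, PySem.List.pyGet?, PySem.List.pyIdx?, List.getLast_eq_getElem]
  rfl

theorem pvZipFold (t : List Int) (a : Int) (acc : List (Int × Int)) (s : Int) :
    (let r := ((a :: t).zip t).foldl
      (fun (st : List (Int × Int) × Int) pr =>
        if pr.2 ≠ pr.1 + 1 then (st.1 ++ [(st.2, pr.1)], pr.2) else st) (acc, s)
     r.1 ++ [(r.2, (a :: t).getLast (by simp))]) = pvGo acc s a t := by
  induction t generalizing a acc s with
  | nil => simp [pvGo]
  | cons c rest ih =>
    simp only [List.zip_cons_cons, List.foldl_cons]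
    by_cases hc : c = a + 1
    · rw [if_neg (by simpa using hc)]
      have := ih c acc s
      simp only [pvGo, if_neg (show ¬ c ≠ a + 1 by simpa using hc)]
      simpa [List.getLast] using this
    · rw [if_pos (by simpa using hc)]
      have := ih c (acc ++ [(s, a)]) c
      simp only [pvGo, if_pos (show c ≠ a + 1 from hc)]
      simpa [List.getLast] using this

theorem pvMapRange (a : Int) (t : List Int) :
    (PySem.List.pyRange 1 ((a :: t).length : Int) 1).map
      (fun i => (PySem.List.pyGetD (a :: t) (i - 1) 0, PySem.List.pyGetD (a :: t) i 0)) =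
    (a :: t).zip t := by
  apply List.ext_getElem
  · simp [PySem.List.length_pyRange_one]
  · intro k h1 h2
    simp only [List.getElem_map]
    have hk : k < t.length := by
      have := h1; simp [PySem.List.length_pyRange_one] at this; omega
    rw [PySem.List.getElem_pyRange_one]
    have e1 : (1 : Int) + (k : Int) - 1 = (k : Int) := by ring
    rw [e1]
    rw [PySem.List.pyGetD_eq_getElem _ _ (by positivity) (by simp; omega)]
    rw [PySem.List.pyGetD_eq_getElem _ _ (by omega) (by simp; omega)]
    have e2 : ((1 : Int) + (k : Int)).toNat = k + 1 := by omega
    have e3 : ((k : Int)).toNat = k := by omega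
    rw [List.getElem_zip]
    simp [e2, e3]

theorem pvAfold_eq_go (a : Int) (t : List Int) :
    ((PySem.List.pyRange 1 (((a :: t) : List Int).length : Int) 1).foldl
        (fun (st : List (Int × Int) × Int) i =>
          if PySem.List.pyGetD (a :: t) i 0 ≠ PySem.List.pyGetD (a :: t) (i - 1) 0 + 1 then
            (st.1 ++ [(st.2, PySem.List.pyGetD (a :: t) (i - 1) 0)], PySem.List.pyGetD (a :: t) i 0)
          else st)
        ([], PySem.List.pyGetD (a :: t) 0 0)).1 ++
      [(((PySem.List.pyRange 1 (((a :: t) : List Int).length : Int) 1).foldl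
        (fun (st : List (Int × Int) × Int) i =>
          if PySem.List.pyGetD (a :: t) i 0 ≠ PySem.List.pyGetD (a :: t) (i - 1) 0 + 1 then
            (st.1 ++ [(st.2, PySem.List.pyGetD (a :: t) (i - 1) 0)], PySem.List.pyGetD (a :: t) i 0)
          else st)
        ([], PySem.List.pyGetD (a :: t) 0 0)).2, PySem.List.pyGetD (a :: t) (-1) 0)]
      = pvGo [] a a t := by
  have hfold : (PySem.List.pyRange 1 ((a :: t).length : Int) 1).foldl
        (fun (st : List (Int × Int) × Int) i =>
          if PySem.List.pyGetD (a :: t) i 0 ≠ PySem.List.pyGetD (a :: t) (i - 1) 0 + 1 then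
            (st.1 ++ [(st.2, PySem.List.pyGetD (a :: t) (i - 1) 0)], PySem.List.pyGetD (a :: t) i 0)
          else st)
        ([], PySem.List.pyGetD (a :: t) 0 0)
      = ((a :: t).zip t).foldl
        (fun (st : List (Int × Int) × Int) pr =>
          if pr.2 ≠ pr.1 + 1 then (st.1 ++ [(st.2, pr.1)], pr.2) else st)
        ([], a) := by
    rw [← pvMapRange a t, List.foldl_map]
    simp [PySem.List.pyGetD_of_nonneg]
  rw [hfold, pvGetD_neg_one]
  exact pvZipFold t a [] a

theorem pvAset_mem (ranges : List (Int × Int)) (s0 : PySem.Set Int) (x : Int) :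
    x ∈ ranges.foldl (fun s p => PySem.Set.update s (PySem.List.pyRange p.1 (p.2 + 1) 1)) s0 ↔
      x ∈ s0 ∨ pvCov ranges x := by
  induction ranges generalizing s0 with
  | nil => simp [pvCov]
  | cons r rest ih =>
    rw [List.foldl_cons, ih, PySem.Set.mem_update, PySem.List.mem_pyRange_one, pvCov_cons]
    constructor
    · rintro ((h | h) | h)
      · tauto
      · exact Or.inr (Or.inl ⟨h.1, by omega⟩)
      · tauto
    · rintro (h | h | h)
      · tauto
      · exact Or.inl (Or.inr ⟨h.1, by omega⟩)
      · tauto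

theorem pvAset_nodup (ranges : List (Int × Int)) (s0 : PySem.Set Int) (h : s0.Nodup) :
    (ranges.foldl (fun s p => PySem.Set.update s (PySem.List.pyRange p.1 (p.2 + 1) 1)) s0).Nodup := by
  induction ranges generalizing s0 with
  | nil => exact h
  | cons r rest ih => exact ih _ (PySem.Set.nodup_update _ _ h)

theorem pvAinter_mem (rest : List (PySem.Set Int)) (s0 : PySem.Set Int) (x : Int) :
    x ∈ rest.foldl PySem.Set.inter s0 ↔ x ∈ s0 ∧ ∀ s ∈ rest, x ∈ s := by
  induction rest generalizing s0 with
  | nil => simp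
  | cons s rest ih =>
    rw [List.foldl_cons, ih, PySem.Set.mem_inter]
    simp only [List.mem_cons]
    constructor
    · rintro ⟨⟨h1, h2⟩, h3⟩
      exact ⟨h1, fun r hr => by rcases hr with rfl | hr; exact h2; exact h3 r hr⟩
    · rintro ⟨h1, h2⟩
      exact ⟨⟨h1, h2 s (Or.inl rfl)⟩, fun r hr => h2 r (Or.inr hr)⟩

theorem pvAinter_nodup (rest : List (PySem.Set Int)) (s0 : PySem.Set Int) (h : s0.Nodup) :
    (rest.foldl PySem.Set.inter s0).Nodup := by
  induction rest generalizing s0 with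
  | nil => exact h
  | cons s rest ih => exact ih _ (PySem.Set.nodup_inter _ _ h)

-- ---------- B side ----------

def pvFin (st : List (Int × Int) × Option (Int × Int)) : List (Int × Int) :=
  match st.2 with
  | none => st.1
  | some cur => st.1 ++ [cur]

theorem pvMerge_go (ivs : List (Int × Int)) (out : List (Int × Int)) (cur : Int × Int)
    (hov : ∀ p ∈ out, p.1 ≤ p.2) (hop : out.Pairwise (fun p q => p.2 + 2 ≤ q.1))
    (hob : ∀ p ∈ out, p.2 + 2 ≤ cur.1) (hcv : cur.1 ≤ cur.2)
    (hfut : ∀ q ∈ ivs, cur.1 ≤ q.1)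
    (hs : ivs.Pairwise (fun p q => p.1 ≤ q.1)) (hv : ∀ q ∈ ivs, q.1 ≤ q.2) :
    pvNorm (pvFin (ivs.foldl pvMergeStep (out, some cur))) ∧
    ∀ x, (pvCov (pvFin (ivs.foldl pvMergeStep (out, some cur))) x ↔
      pvCov out x ∨ (cur.1 ≤ x ∧ x ≤ cur.2) ∨ pvCov ivs x) := by
  induction ivs generalizing out cur with
  | nil =>
    simp only [List.foldl_nil, pvFin]
    constructor
    · constructor
      · intro p hp
        rcases List.mem_append.mp hp with h | h
        · exact hov p h
        · simp at h; subst h; exact hcv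
      · rw [List.pairwise_append]
        refine ⟨hop, List.pairwise_singleton _ _, ?_⟩
        intro p h1 q h2; simp at h2; subst h2; exact hob p h1
    · intro x
      rw [pvCov_append]
      simp [pvCov]
  | cons q ivs ih =>
    have hq1 : cur.1 ≤ q.1 := hfut q (by simp)
    have hqv : q.1 ≤ q.2 := hv q (by simp)
    have hfut' : ∀ r ∈ ivs, q.1 ≤ r.1 := fun r hr => (List.pairwise_cons.mp hs).1 r hr
    rw [List.foldl_cons]
    show pvNorm (pvFin (ivs.foldl pvMergeStep (pvMergeStep (out, some cur) q))) ∧ _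
    simp only [pvMergeStep]
    split_ifs with h1 h2
    · -- merge, extend: new cur = (cur.1, q.2)
      obtain ⟨hn, hc⟩ := ih out (cur.1, q.2) hov hop hob (by omega)
        (fun r hr => hfut' r hr |>.trans' (by omega))
        (List.pairwise_cons.mp hs).2 (fun r hr => hv r (by simp [hr]))
      refine ⟨hn, fun x => ?_⟩
      rw [hc x, pvCov_cons]
      constructor
      · rintro (h | h | h)
        · tauto
        · by_cases hx : x ≤ cur.2
          · exact Or.inr (Or.inl ⟨h.1, hx⟩)
          · exact Or.inr (Or.inr (Or.inl ⟨by omega, h.2⟩))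
        · tauto
      · rintro (h | h | h)
        · tauto
        · exact Or.inr (Or.inl ⟨h.1, by omega⟩)
        · rcases h with h | h
          · exact Or.inr (Or.inl ⟨by omega, by omega⟩)
          · tauto
    · -- merge, absorbed: state unchanged
      obtain ⟨hn, hc⟩ := ih out cur hov hop hob hcv
        (fun r hr => hfut r (by simp [hr]))
        (List.pairwise_cons.mp hs).2 (fun r hr => hv r (by simp [hr]))
      refine ⟨hn, fun x => ?_⟩
      rw [hc x, pvCov_cons]
      constructor
      · rintro (h | h | h) <;> tauto
      · rintro (h | h | h)
        · tauto
        · tauto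
        · rcases h with h | h
          · exact Or.inr (Or.inl ⟨by omega, by omega⟩)
          · tauto
    · -- gap: flush cur, start q
      have hgap : cur.2 + 2 ≤ q.1 := by omega
      obtain ⟨hn, hc⟩ := ih (out ++ [cur]) q
        (by intro p hp; rcases List.mem_append.mp hp with h | h
            · exact hov p h
            · simp at h; subst h; exact hcv)
        (by rw [List.pairwise_append]
            refine ⟨hop, List.pairwise_singleton _ _, ?_⟩
            intro p hp r hr; simp at hr; subst hr; exact hob p hp)
        (by intro p hp; rcases List.mem_append.mp hp with h | h
            · have := hob p h; omega
            · simp at h; subst h; exact hgap)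
        hqv hfut' (List.pairwise_cons.mp hs).2 (fun r hr => hv r (by simp [hr]))
      refine ⟨hn, fun x => ?_⟩
      rw [hc x, pvCov_append, pvCov_cons, pvCov_cons]
      have hnil : ¬ pvCov ([] : List (Int × Int)) x := by simp [pvCov]
      tauto

theorem pvMerge_spec (ivs : List (Int × Int)) (hv : ∀ p ∈ ivs, p.1 ≤ p.2)
    (hs : ivs.Pairwise (fun p q => p.1 ≤ q.1)) :
    pvNorm (pvMerge ivs) ∧ ∀ x, (pvCov (pvMerge ivs) x ↔ pvCov ivs x) := by
  cases ivs with
  | nil =>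
    refine ⟨⟨?_, ?_⟩, fun x => Iff.rfl⟩
    · simp [pvMerge]
    · simp [pvMerge]
  | cons q ivs =>
    have hqv : q.1 ≤ q.2 := hv q (by simp)
    obtain ⟨hn, hc⟩ := pvMerge_go ivs [] q (by simp) (by simp) (by simp) hqv
      (fun r hr => (List.pairwise_cons.mp hs).1 r hr |>.trans' (le_refl _))
      (List.pairwise_cons.mp hs).2 (fun r hr => hv r (by simp [hr]))
    have he : pvMerge (q :: ivs) = pvFin (ivs.foldl pvMergeStep ([], some q)) := by
      simp [pvMerge, pvFin, pvMergeStep]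
    rw [he]
    refine ⟨hn, fun x => ?_⟩
    rw [hc x, pvCov_cons]
    simp [pvCov]

theorem pvIntersect_mem (xs ys : List (Int × Int)) (p : Int × Int)
    (h : p ∈ pvIntersect xs ys) :
    p.1 ≤ p.2 ∧ (∃ a ∈ xs, a.1 ≤ p.1) ∧ (∃ b ∈ ys, b.1 ≤ p.1) := by
  fun_induction pvIntersect xs ys with
  | case1 x xs y ys s e hd hle ih =>
    rcases List.mem_append.mp h with h1 | h1
    · have : s ≤ e ∧ p = (s, e) := by
        by_cases hse : s ≤ e
        · simp [hd, hse] at h1; exact ⟨hse, by simp [h1]⟩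
        · simp [hd, hse] at h1
      obtain ⟨hse, rfl⟩ := this
      exact ⟨hse, ⟨x, by simp, by simp [s]⟩, ⟨y, by simp, by simp [s]⟩⟩
    · obtain ⟨hv, ⟨a, ha, ha2⟩, ⟨b, hb, hb2⟩⟩ := ih h1
      exact ⟨hv, ⟨a, by simp [ha], ha2⟩, ⟨b, hb, hb2⟩⟩
  | case2 x xs y ys s e hd hle ih =>
    rcases List.mem_append.mp h with h1 | h1
    · have : s ≤ e ∧ p = (s, e) := by
        by_cases hse : s ≤ e
        · simp [hd, hse] at h1; exact ⟨hse, by simp [h1]⟩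
        · simp [hd, hse] at h1
      obtain ⟨hse, rfl⟩ := this
      exact ⟨hse, ⟨x, by simp, by simp [s]⟩, ⟨y, by simp, by simp [s]⟩⟩
    · obtain ⟨hv, ⟨a, ha, ha2⟩, ⟨b, hb, hb2⟩⟩ := ih h1
      exact ⟨hv, ⟨a, ha, ha2⟩, ⟨b, by simp [hb], hb2⟩⟩
  | case3 xs ys h1 => simp at h

theorem pvIntersect_norm (xs ys : List (Int × Int)) (hx : pvNorm xs) (hy : pvNorm ys) :
    pvNorm (pvIntersect xs ys) := by
  fun_induction pvIntersect xs ys with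
  | case1 x xs y ys s e hd hle ih =>
    have hx' : pvNorm xs := ⟨fun p hp => hx.1 p (by simp [hp]), hx.2.of_cons⟩
    have hn := ih hx' hy
    refine ⟨?_, ?_⟩
    · intro p hp
      rcases List.mem_append.mp hp with h1 | h1
      · by_cases hse : s ≤ e
        · simp [hd, hse] at h1; subst h1; exact hse
        · simp [hd, hse] at h1
      · exact hn.1 p h1
    · rw [List.pairwise_append]
      refine ⟨?_, hn.2, ?_⟩
      · by_cases hse : s ≤ e
        · simp [hd, hse]
        · simp [hd, hse]
      · intro p hp q hq
        by_cases hse : s ≤ e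
        · simp [hd, hse] at hp
          subst hp
          obtain ⟨_, ⟨a, ha, ha2⟩, _⟩ := pvIntersect_mem _ _ _ hq
          have := (List.pairwise_cons.mp hx.2).1 a ha
          simp only [e]
          omega
        · simp [hd, hse] at hp
  | case2 x xs y ys s e hd hle ih =>
    have hy' : pvNorm ys := ⟨fun p hp => hy.1 p (by simp [hp]), hy.2.of_cons⟩
    have hn := ih hx hy'
    refine ⟨?_, ?_⟩
    · intro p hp
      rcases List.mem_append.mp hp with h1 | h1
      · by_cases hse : s ≤ e
        · simp [hd, hse] at h1; subst h1; exact hse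
        · simp [hd, hse] at h1
      · exact hn.1 p h1
    · rw [List.pairwise_append]
      refine ⟨?_, hn.2, ?_⟩
      · by_cases hse : s ≤ e
        · simp [hd, hse]
        · simp [hd, hse]
      · intro p hp q hq
        by_cases hse : s ≤ e
        · simp [hd, hse] at hp
          subst hp
          obtain ⟨_, _, ⟨b, hb, hb2⟩⟩ := pvIntersect_mem _ _ _ hq
          have := (List.pairwise_cons.mp hy.2).1 b hb
          simp only [e]
          omega
        · simp [hd, hse] at hp
  | case3 xs ys h1 => exact ⟨by simp, by simp⟩

theorem pvIntersect_cov (xs ys : List (Int × Int)) (hx : pvNorm xs) (hy : pvNorm ys) (z : Int) :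
    pvCov (pvIntersect xs ys) z ↔ pvCov xs z ∧ pvCov ys z := by
  fun_induction pvIntersect xs ys with
  | case1 x xs y ys s e hd hle ih =>
    have hx' : pvNorm xs := ⟨fun p hp => hx.1 p (by simp [hp]), hx.2.of_cons⟩
    rw [pvCov_append, ih hx' hy, pvCov_cons, pvCov_cons]
    have hhd : pvCov hd z ↔ (s ≤ z ∧ z ≤ e) := by
      by_cases hse : s ≤ e
      · simp [hd, hse, pvCov]
      · simp [hd, hse, pvCov]; omega
    rw [hhd]
    have hyb : ∀ w, pvCov ys w → y.2 + 2 ≤ w := by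
      rintro w ⟨r, hr, h1, h2⟩
      have := (List.pairwise_cons.mp hy.2).1 r hr
      omega
    constructor
    · rintro (h1 | ⟨h1, h2⟩)
      · constructor
        · exact Or.inl ⟨by simp only [s] at h1; omega, by simp only [e] at h1; omega⟩
        · exact Or.inl ⟨by simp only [s] at h1; omega, by simp only [e] at h1; omega⟩
      · exact ⟨Or.inr h1, h2⟩
    · rintro ⟨h1 | h1, h2⟩
      · -- covered by x; then among y :: ys must be y (later ys start past x.2)
        rcases h2 with h2 | h2
        · exact Or.inl ⟨by simp only [s]; omega, by simp only [e]; omega⟩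
        · have := hyb z h2; omega
      · exact Or.inr ⟨h1, h2⟩
  | case2 x xs y ys s e hd hle ih =>
    have hy' : pvNorm ys := ⟨fun p hp => hy.1 p (by simp [hp]), hy.2.of_cons⟩
    rw [pvCov_append, ih hx hy', pvCov_cons, pvCov_cons]
    have hhd : pvCov hd z ↔ (s ≤ z ∧ z ≤ e) := by
      by_cases hse : s ≤ e
      · simp [hd, hse, pvCov]
      · simp [hd, hse, pvCov]; omega
    rw [hhd]
    have hxb : ∀ w, pvCov xs w → x.2 + 2 ≤ w := by
      rintro w ⟨r, hr, h1, h2⟩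
      have := (List.pairwise_cons.mp hx.2).1 r hr
      omega
    constructor
    · rintro (h1 | ⟨h1, h2⟩)
      · constructor
        · exact Or.inl ⟨by simp only [s] at h1; omega, by simp only [e] at h1; omega⟩
        · exact Or.inl ⟨by simp only [s] at h1; omega, by simp only [e] at h1; omega⟩
      · exact ⟨h1, Or.inr h2⟩
    · rintro ⟨h1, h2 | h2⟩
      · rcases h1 with h1 | h1
        · exact Or.inl ⟨by simp only [s]; omega, by simp only [e]; omega⟩
        · have := hxb z h1; omega
      · exact Or.inr ⟨h1, h2⟩
  | case3 xs ys h1 =>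
    simp only [pvCov, List.not_mem_nil, false_and, exists_false, false_iff]
    rintro ⟨⟨r, hr, _⟩, ⟨r2, hr2, _⟩⟩
    rcases xs with _ | ⟨a, xs⟩
    · simp at hr
    · rcases ys with _ | ⟨b, ys⟩
      · simp at hr2
      · exact h1 a xs b ys rfl rfl

theorem pvBfold_spec (rest : List (List (Int × Int))) (c0 : List (Int × Int))
    (h0 : pvNorm c0) (h : ∀ c ∈ rest, pvNorm c) :
    pvNorm (rest.foldl pvIntersect c0) ∧
      ∀ x, (pvCov (rest.foldl pvIntersect c0) x ↔ pvCov c0 x ∧ ∀ c ∈ rest, pvCov c x) := by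
  induction rest generalizing c0 with
  | nil => exact ⟨h0, fun x => by simp⟩
  | cons c rest ih =>
    have hc : pvNorm c := h c (by simp)
    obtain ⟨hn, hcov⟩ := ih (pvIntersect c0 c) (pvIntersect_norm _ _ h0 hc)
      (fun d hd => h d (by simp [hd]))
    refine ⟨hn, fun x => ?_⟩
    rw [List.foldl_cons, hcov x, pvIntersect_cov _ _ h0 hc]
    simp only [List.mem_cons]
    constructor
    · rintro ⟨⟨h1, h2⟩, h3⟩
      exact ⟨h1, fun d hd => by rcases hd with rfl | hd; exact h2; exact h3 d hd⟩
    · rintro ⟨h1, h2⟩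
      exact ⟨⟨h1, h2 c (Or.inl rfl)⟩, fun d hd => h2 d (Or.inr hd)⟩

theorem pvBcol_spec (ranges : List (Int × Int)) :
    pvNorm (pvMerge (PySem.List.sorted (ranges.filter (fun p => p.1 ≤ p.2)) (fun p => p.1) false)) ∧
    ∀ x, (pvCov (pvMerge (PySem.List.sorted (ranges.filter (fun p => p.1 ≤ p.2)) (fun p => p.1) false)) x ↔
      pvCov ranges x) := by
  set l := PySem.List.sorted (ranges.filter (fun p => p.1 ≤ p.2)) (fun p => p.1) false with hl
  have hmem : ∀ p, p ∈ l ↔ p ∈ ranges.filter (fun p => p.1 ≤ p.2) := fun p =>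
    PySem.List.mem_sorted _ _ _ _
  have hv : ∀ p ∈ l, p.1 ≤ p.2 := by
    intro p hp
    have := (hmem p).mp hp
    simpa using (List.mem_filter.mp this).2
  have hs : l.Pairwise (fun p q => p.1 ≤ q.1) := PySem.List.sorted_pairwise _ _
  obtain ⟨hn, hcov⟩ := pvMerge_spec l hv hs
  refine ⟨hn, fun x => ?_⟩
  rw [hcov x]
  constructor
  · rintro ⟨p, hp, h1, h2⟩
    exact ⟨p, List.mem_of_mem_filter ((hmem p).mp hp), h1, h2⟩
  · rintro ⟨p, hp, h1, h2⟩
    exact ⟨p, (hmem p).mpr (List.mem_filter.mpr ⟨hp, by simp; omega⟩), h1, h2⟩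

theorem pvB_spec (nan_ranges : List (String × List (Int × Int))) (h : nan_ranges ≠ []) :
    pvNorm (find_common_nan_ranges_alt nan_ranges) ∧
    ∀ x, (pvCov (find_common_nan_ranges_alt nan_ranges) x ↔ ∀ cr ∈ nan_ranges, pvCov cr.2 x) := by
  obtain ⟨h0, t, rfl⟩ : ∃ h0 t, nan_ranges = h0 :: t := by
    cases nan_ranges with
    | nil => exact absurd rfl h
    | cons a t => exact ⟨a, t, rfl⟩
  simp only [find_common_nan_ranges_alt, List.map_cons]
  have hcol := fun (ranges : List (Int × Int)) => pvBcol_spec ranges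
  obtain ⟨hn, hcov⟩ := pvBfold_spec
    (t.map (fun cr => pvMerge (PySem.List.sorted (cr.2.filter (fun p => p.1 ≤ p.2)) (fun p => p.1) false)))
    _ (hcol h0.2).1
    (by intro c hc
        obtain ⟨cr, _, rfl⟩ := List.mem_map.mp hc
        exact (hcol cr.2).1)
  refine ⟨hn, fun x => ?_⟩
  rw [hcov x, (hcol h0.2).2 x]
  simp only [List.mem_cons, List.forall_mem_map]
  constructor
  · rintro ⟨h1, h2⟩ cr hcr
    rcases hcr with rfl | hcr
    · exact h1
    · exact ((hcol cr.2).2 x).mp (h2 cr hcr)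
  · intro h1
    exact ⟨h1 h0 (Or.inl rfl), fun cr hcr => ((hcol cr.2).2 x).mpr (h1 cr (Or.inr hcr))⟩

theorem pvA_spec (nan_ranges : List (String × List (Int × Int))) (h : nan_ranges ≠ []) :
    pvNorm (find_common_nan_ranges nan_ranges) ∧
    ∀ x, (pvCov (find_common_nan_ranges nan_ranges) x ↔ ∀ cr ∈ nan_ranges, pvCov cr.2 x) := by
  obtain ⟨h0, t, rfl⟩ : ∃ h0 t, nan_ranges = h0 :: t := by
    cases nan_ranges with
    | nil => exact absurd rfl h
    | cons a t => exact ⟨a, t, rfl⟩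
  simp only [find_common_nan_ranges, List.map_cons]
  set f : String × List (Int × Int) → PySem.Set Int := fun cr =>
    cr.2.foldl (fun s p => PySem.Set.update s (PySem.List.pyRange p.1 (p.2 + 1) 1)) PySem.Set.empty with hf
  set common := (t.map f).foldl PySem.Set.inter (f h0) with hcommon
  have hsetmem : ∀ (cr : String × List (Int × Int)) (x : Int), x ∈ f cr ↔ pvCov cr.2 x := by
    intro cr x
    rw [hf]
    rw [pvAset_mem]
    simp [PySem.Set.empty]
  have hmemS : ∀ x, x ∈ common ↔ ∀ cr ∈ h0 :: t, pvCov cr.2 x := by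
    intro x
    rw [hcommon, pvAinter_mem, hsetmem]
    simp only [List.mem_cons, List.forall_mem_map]
    constructor
    · rintro ⟨h1, h2⟩ cr hcr
      rcases hcr with rfl | hcr
      · exact h1
      · exact (hsetmem cr x).mp (h2 cr hcr)
    · intro h1
      exact ⟨h1 h0 (Or.inl rfl), fun cr hcr => (hsetmem cr x).mpr (h1 cr (Or.inr hcr))⟩
  have hnodup : common.Nodup := pvAinter_nodup _ _ (pvAset_nodup _ _ (by simp [PySem.Set.empty]))
  by_cases hemp : common.isEmpty
  · rw [if_pos hemp]
    have hnil : common = [] := List.isEmpty_iff.mp hemp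
    refine ⟨⟨by simp, by simp⟩, fun x => ?_⟩
    constructor
    · intro hc; exact absurd hc (by simp [pvCov])
    · intro hc
      have := (hmemS x).mpr hc
      rw [hnil] at this
      simp at this
  · rw [if_neg hemp]
    have hne : common ≠ [] := fun hc => hemp (by simp [hc])
    obtain ⟨a, t', hsorted⟩ : ∃ a t', PySem.List.sorted common (fun x => x) false = a :: t' := by
      cases hs : PySem.List.sorted common (fun x => x) false with
      | nil =>
        exfalso
        have := PySem.List.sorted_perm common (fun x => x) false
        rw [hs] at this
        exact hne (List.Perm.nil_eq this).symm
      | cons a t' => exact ⟨a, t', rfl⟩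
    have hperm : (a :: t').Perm common := by
      rw [← hsorted]; exact PySem.List.sorted_perm common (fun x => x) false
    have hmemsort : ∀ x, x ∈ a :: t' ↔ x ∈ common := fun x => hperm.mem_iff
    have hlt : (a :: t').Pairwise (· < ·) := by
      have hle : (a :: t').Pairwise (· ≤ ·) := by
        rw [← hsorted]; exact PySem.List.sorted_pairwise common (fun x => x)
      have hnd : (a :: t').Nodup := hperm.nodup_iff.mpr hnodup
      exact (hle.and hnd).imp (fun hab => lt_of_le_of_ne hab.1 hab.2)
    rw [hsorted, pvAfold_eq_go]
    refine ⟨pvGo_norm t' [] a a (by simp) (by simp) (by simp) (le_refl a)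
      (List.isChain_iff_pairwise.mpr hlt), fun x => ?_⟩
    rw [pvGo_cov t' [] a a x (le_refl a), ← hmemS x, ← hmemsort x]
    simp only [List.mem_cons]
    constructor
    · rintro (h1 | h1 | h1)
      · exact absurd h1 (by simp [pvCov])
      · exact Or.inl (by omega)
      · exact Or.inr h1
    · rintro (rfl | h1)
      · exact Or.inr (Or.inl ⟨le_refl _, le_refl _⟩)
      · exact Or.inr (Or.inr h1)

-- ===== VERDICT (by name: the statement is the Claim_ definition above) =====
theorem find_common_nan_ranges_spec : Claim_equal_find_common_nan_ranges := by
  intro nan_ranges _ hpre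
  obtain ⟨hne, _⟩ := hpre
  obtain ⟨hA, hAc⟩ := pvA_spec nan_ranges hne
  obtain ⟨hB, hBc⟩ := pvB_spec nan_ranges hne
  show find_common_nan_ranges nan_ranges = find_common_nan_ranges_alt nan_ranges
  exact pvNorm_unique _ _ hA hB (fun x => (hAc x).trans ((hBc x).symm))
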